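-- pv_equiv track=rewrite | github.com/YannEbling/bomberman_rl | auxiliary_functions.py | convert_pos
-- ===== SOURCE A (Python) =====
-- def convert_pos(position_tuple: tuple, n, is_a_coin=False):
--     """
--     I don't even know anymore
--     """
--
--     x, y = position_tuple
--     if x == y == 0:  # This case shouldn't occur in the real game, because (0,0) is a wall. However, we can use this,
--         return 0     # to mark the absence of any bomb or coin. It will be treated as a bomb/coin being placed at (0,0) and should have index 0.
--     conv_pos = 0
--     subtractor = 0
--     conv_pos += ((y-1)//2) * (n//2) + ((y-1) - (y-1)//2) * (n-1)
--     if y % 2 == 0: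
--         conv_pos += (x - x//2)
--     else:
--         conv_pos += x
--
--     if is_a_coin:
--         for y_k in range(y+1):
--             subtractor += y_k - 1
--             if y_k % 2 == 0:
--                 subtractor -= (y_k-1)//2
--
--     conv_pos -= subtractor
--     return int(conv_pos)
-- ===== SOURCE B (Python) =====
-- def convert_pos(position_tuple: tuple, n, is_a_coin=False):
--     x, y = position_tuple
--     if x == y == 0:
--         return 0
--     half = (y - 1) // 2
--     conv_pos = half * (n // 2) + ((y - 1) - half) * (n - 1)
--     conv_pos += (x - x // 2) if y % 2 == 0 else x
--     if is_a_coin and y >= 0: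
--         m = y // 2
--         conv_pos -= (y * (y + 1)) // 2 - (y + 1) - ((m * (m + 1)) // 2 - (m + 1))
--     return conv_pos
-- ===== Notes on version B (the rewrite author's own statement) =====
-- stated objective: faster
-- what changed: The O(y) subtractor loop over range(y+1) is replaced by a closed-form arithmetic-series formula (triangular sums for the odd and even terms), guarded by y >= 0 for the empty-range case.
import Mathlib
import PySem

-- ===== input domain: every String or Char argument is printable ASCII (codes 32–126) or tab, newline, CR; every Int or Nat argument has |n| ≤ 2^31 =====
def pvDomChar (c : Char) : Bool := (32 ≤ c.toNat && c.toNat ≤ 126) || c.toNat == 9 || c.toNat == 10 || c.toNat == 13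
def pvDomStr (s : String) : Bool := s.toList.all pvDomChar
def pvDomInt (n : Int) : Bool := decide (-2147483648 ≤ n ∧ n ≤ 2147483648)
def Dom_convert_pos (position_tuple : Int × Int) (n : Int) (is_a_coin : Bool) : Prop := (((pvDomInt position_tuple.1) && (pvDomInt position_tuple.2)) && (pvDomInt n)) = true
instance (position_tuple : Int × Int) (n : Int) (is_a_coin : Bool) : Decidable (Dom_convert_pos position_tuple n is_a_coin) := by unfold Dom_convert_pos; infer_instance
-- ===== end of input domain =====

-- B replaces A's O(y) subtractor loop by a closed-form arithmetic-series formula (objective: faster).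

-- ===== PORT A =====
-- loop body of A's `for y_k in range(y+1)` subtractor loop
def pvStep (s y_k : Int) : Int :=
  let s := s + y_k - 1
  if PySem.Int.mod y_k 2 = 0 then s - PySem.Int.floordiv (y_k - 1) 2 else s

def convert_pos (position_tuple : Int × Int) (n : Int) (is_a_coin : Bool) : Int :=
  let x := position_tuple.1
  let y := position_tuple.2
  if x = y ∧ y = 0 then 0
  else
    let conv_pos : Int := 0
    let subtractor : Int := 0
    let conv_pos := conv_pos + PySem.Int.floordiv (y-1) 2 * PySem.Int.floordiv n 2 + ((y-1) - PySem.Int.floordiv (y-1) 2) * (n-1)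
    let conv_pos := if PySem.Int.mod y 2 = 0 then conv_pos + (x - PySem.Int.floordiv x 2) else conv_pos + x
    let subtractor := if is_a_coin then (PySem.List.pyRange 0 (y+1) 1).foldl pvStep subtractor else subtractor
    conv_pos - subtractor

-- ===== PORT B =====
def convert_pos_alt (position_tuple : Int × Int) (n : Int) (is_a_coin : Bool) : Int :=
  let x := position_tuple.1
  let y := position_tuple.2
  if x = y ∧ y = 0 then 0
  else
    let half := PySem.Int.floordiv (y-1) 2
    let conv_pos := half * PySem.Int.floordiv n 2 + ((y-1) - half) * (n-1)
    let conv_pos := conv_pos + (if PySem.Int.mod y 2 = 0 then x - PySem.Int.floordiv x 2 else x)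
    if is_a_coin ∧ 0 ≤ y then
      let m := PySem.Int.floordiv y 2
      conv_pos - (PySem.Int.floordiv (y*(y+1)) 2 - (y+1) - (PySem.Int.floordiv (m*(m+1)) 2 - (m+1)))
    else conv_pos

-- ===== PRECONDITION & SPEC =====
def Spec_convert_pos (position_tuple : Int × Int) (n : Int) (is_a_coin : Bool) (out : Int) : Prop := out = convert_pos_alt position_tuple n is_a_coin
instance (position_tuple : Int × Int) (n : Int) (is_a_coin : Bool) (out : Int) : Decidable (Spec_convert_pos position_tuple n is_a_coin out) := by unfold Spec_convert_pos; infer_instance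

-- ===== CLAIM (what is proved, stated in full; the proofs are below) =====
def Claim_equal_convert_pos : Prop := ∀ (position_tuple : Int × Int) (n : Int) (is_a_coin : Bool), Dom_convert_pos position_tuple n is_a_coin → Spec_convert_pos position_tuple n is_a_coin (convert_pos position_tuple n is_a_coin)

-- ===== LEMMAS AND PROOFS =====

theorem pvFd2 (a : Int) : PySem.Int.floordiv a 2 = a / 2 :=
  PySem.Int.floordiv_eq_ediv_of_pos (by norm_num)

theorem pvMod2 (a : Int) : PySem.Int.mod a 2 = a % 2 :=
  PySem.Int.mod_eq_emod_of_pos (by norm_num)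

theorem pvEvenProd (a : Int) : ∃ r, a * (a + 1) = 2 * r := by
  rcases Int.even_mul_succ_self a with ⟨r, hr⟩
  exact ⟨r, by omega⟩

-- value of A's subtractor loop at y = 2M (even) and y = 2M+1 (odd), doubled to avoid divisions
theorem pvLoopSum (M : Nat) :
    2 * ((PySem.List.pyRange 0 (2*(M:Int)+1) 1).foldl pvStep 0)
      = 2*(M:Int)*(2*(M:Int)+1) - 2*(2*(M:Int)+1) - (M:Int)*((M:Int)+1) + 2*((M:Int)+1)
  ∧ 2 * ((PySem.List.pyRange 0 (2*(M:Int)+2) 1).foldl pvStep 0)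
      = 2*(2*(M:Int)+1)*((M:Int)+1) - 2*(2*(M:Int)+2) - (M:Int)*((M:Int)+1) + 2*((M:Int)+1) := by
  induction M with
  | zero => constructor <;> decide
  | succ k ih =>
    obtain ⟨ih1, ih2⟩ := ih
    push_cast
    have heq : (PySem.List.pyRange 0 (2*((k:Int)+1)+1) 1)
        = PySem.List.pyRange 0 (2*(k:Int)+2) 1 ++ [2*(k:Int)+2] := by
      have := PySem.List.pyRange_one_succ_right (a := 0) (b := 2*(k:Int)+2) (by omega)
      rw [show (2*((k:Int)+1)+1) = (2*(k:Int)+2)+1 by ring, this]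
    have h1 : 2 * ((PySem.List.pyRange 0 (2*((k:Int)+1)+1) 1).foldl pvStep 0)
        = 2*((k:Int)+1)*(2*((k:Int)+1)+1) - 2*(2*((k:Int)+1)+1) - ((k:Int)+1)*((k:Int)+1+1) + 2*((k:Int)+1+1) := by
      rw [heq, List.foldl_append]
      simp only [List.foldl_cons, List.foldl_nil, pvStep, pvFd2, pvMod2]
      rw [if_pos (by omega)]
      have hd : (2*(k:Int)+2-1)/2 = (k:Int) := by omega
      rw [hd]
      linear_combination ih2
    refine ⟨h1, ?_⟩
    have heq2 : (PySem.List.pyRange 0 (2*((k:Int)+1)+2) 1)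
        = PySem.List.pyRange 0 (2*((k:Int)+1)+1) 1 ++ [2*(k:Int)+3] := by
      have := PySem.List.pyRange_one_succ_right (a := 0) (b := 2*(k:Int)+3) (by omega)
      rw [show (2*((k:Int)+1)+2) = (2*(k:Int)+3)+1 by ring,
          show (2*((k:Int)+1)+1) = (2*(k:Int)+3) by ring, this]
    rw [heq2, List.foldl_append]
    simp only [List.foldl_cons, List.foldl_nil, pvStep, pvFd2, pvMod2]
    rw [if_neg (by omega)]
    linear_combination h1

-- A's loop equals B's closed form for every y ≥ 0
theorem pvLoopClosed (y : Int) (hy : 0 ≤ y) :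
    (PySem.List.pyRange 0 (y+1) 1).foldl pvStep 0
      = PySem.Int.floordiv (y*(y+1)) 2 - (y+1)
        - (PySem.Int.floordiv (PySem.Int.floordiv y 2 * (PySem.Int.floordiv y 2 + 1)) 2
           - (PySem.Int.floordiv y 2 + 1)) := by
  rcases Int.even_or_odd y with ⟨c, hc⟩ | ⟨c, hc⟩
  all_goals {
    subst hc
    first
      | (have hc0 : 0 ≤ c := by omega
         have hmv : PySem.Int.floordiv (c + c) 2 = c := by rw [pvFd2]; omega
         obtain ⟨r1, hr1⟩ := pvEvenProd (c + c)
         obtain ⟨r2, hr2⟩ := pvEvenProd c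
         have hq1 : PySem.Int.floordiv ((c+c)*(c+c+1)) 2 = r1 := by rw [hr1, pvFd2]; omega
         have hq2 : PySem.Int.floordiv (c*(c+1)) 2 = r2 := by rw [hr2, pvFd2]; omega
         have hL := (pvLoopSum c.toNat).1
         rw [Int.toNat_of_nonneg hc0] at hL
         rw [hmv, hq1, hq2, show c + c + 1 = 2*c+1 by ring]
         linarith [hL, hr1, hr2])
      | (have hc0 : 0 ≤ c := by omega
         have hmv : PySem.Int.floordiv (2*c + 1) 2 = c := by rw [pvFd2]; omega
         obtain ⟨r1, hr1⟩ := pvEvenProd (2*c + 1)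
         obtain ⟨r2, hr2⟩ := pvEvenProd c
         have hq1 : PySem.Int.floordiv ((2*c+1)*(2*c+1+1)) 2 = r1 := by rw [hr1, pvFd2]; omega
         have hq2 : PySem.Int.floordiv (c*(c+1)) 2 = r2 := by rw [hr2, pvFd2]; omega
         have hL := (pvLoopSum c.toNat).2
         rw [Int.toNat_of_nonneg hc0] at hL
         rw [hmv, hq1, hq2, show 2*c + 1 + 1 = 2*c+2 by ring]
         linarith [hL, hr1, hr2]) }

-- A's loop is empty for y < 0
theorem pvLoopNeg (y : Int) (hy : y < 0) :
    (PySem.List.pyRange 0 (y+1) 1).foldl pvStep 0 = 0 := by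
  rw [PySem.List.pyRange_one_eq_nil (by omega)]
  rfl

-- ===== VERDICT (by name: the statement is the Claim_ definition above) =====
theorem convert_pos_spec : Claim_equal_convert_pos := by
  intro ⟨x, y⟩ n is_a_coin _
  unfold Spec_convert_pos convert_pos convert_pos_alt
  by_cases h0 : x = y ∧ y = 0
  · simp [h0]
  · simp only [if_neg h0]
    cases is_a_coin with
    | false =>
      simp only [Bool.false_eq_true, if_false, false_and, sub_zero]
      split <;> ring
    | true =>
      simp only [true_and, if_true]
      by_cases hy : 0 ≤ y
      · rw [if_pos hy, pvLoopClosed y hy]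
        split <;> ring
      · rw [if_neg hy, pvLoopNeg y (by omega), sub_zero]
        split <;> ring
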